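-- pv_equiv track=rewrite | github.com/samkas125/GOL_musical | music_generator.py | _thin_notes_by_row
-- ===== SOURCE A (Python) =====
-- from typing import List, Tuple, Dict, Optional, Set
--
-- def _thin_notes_by_row(cells: List[Tuple[int, int]]) -> List[Tuple[int, int]]:
--     """
--     Return only the lowest frequency (highest X coordinate) newborn cell per row.
--     This reduces audio clutter while maintaining musical interest.
--     """
--     if not cells:
--         return []
--
--     # Group cells by row (Y coordinate)
--     rows = {}
--     for x, y in cells:
--         if y not in rows:
--             rows[y] = []
--         rows[y].append((x, y))
--
--     # For each row, find the cell that would produce the lowest frequency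
--     # Lower frequency = higher Y + higher X (based on the frequency calculation)
--     thinned_cells = []
--     for y, row_cells in rows.items():
--         if row_cells:
--             # Sort by X coordinate (descending) to get lowest frequency first
--             # The frequency calculation uses (x + y), so higher x = lower relative freq
--             lowest_freq_cell = max(row_cells, key=lambda cell: cell[0])
--             thinned_cells.append(lowest_freq_cell)
--
--     return thinned_cells
-- ===== SOURCE B (Python) =====
-- from typing import List, Tuple
--
-- def _thin_notes_by_row(cells: List[Tuple[int, int]]) -> List[Tuple[int, int]]:
--     """One streaming pass: keep the running best (highest-x) cell per row."""
--     best = {}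
--     for x, y in cells:
--         cur = best.get(y)
--         if cur is None or x > cur[0]:
--             best[y] = (x, y)
--     return list(best.values())
-- ===== Notes on version B (the rewrite author's own statement) =====
-- stated objective: simpler
-- what changed: Replaces the group-cells-into-per-row-lists pass followed by a max() scan over each row list with a single streaming pass that keeps only the running best (highest-x, first on ties) cell per row in one dict.
import Mathlib
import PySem

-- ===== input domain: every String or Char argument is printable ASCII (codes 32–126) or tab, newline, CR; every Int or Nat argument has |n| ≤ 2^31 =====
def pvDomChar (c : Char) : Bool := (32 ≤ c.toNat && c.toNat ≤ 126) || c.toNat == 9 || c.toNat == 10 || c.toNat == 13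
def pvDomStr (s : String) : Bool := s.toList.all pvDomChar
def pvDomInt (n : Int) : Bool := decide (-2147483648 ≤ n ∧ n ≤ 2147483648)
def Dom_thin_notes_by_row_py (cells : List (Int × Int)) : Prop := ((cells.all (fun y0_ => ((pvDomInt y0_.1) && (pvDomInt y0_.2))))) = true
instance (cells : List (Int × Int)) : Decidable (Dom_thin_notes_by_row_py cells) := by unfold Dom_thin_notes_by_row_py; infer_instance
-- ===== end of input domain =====

-- B replaces A's group-into-per-row-lists pass plus a max() scan per row with one
-- streaming pass keeping the running best (highest-x, first on ties) cell per row: simpler, same cost.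


-- ===== PORT A =====
-- the body of A's grouping loop: 'if y not in rows: rows[y] = []' then 'rows[y].append((x, y))'
def pvGroupStep (d : PySem.Dict Int (List (Int × Int))) (c : Int × Int) :
    PySem.Dict Int (List (Int × Int)) :=
  let d1 := if d.contains c.2 then d else d.insert c.2 []
  d1.modify c.2 [] (fun l => l ++ [c])

-- the body of A's second loop: 'if row_cells: thinned_cells.append(max(row_cells, key=lambda cell: cell[0]))'
def pvPickStep (acc : List (Int × Int)) (p : Int × List (Int × Int)) : List (Int × Int) :=
  if p.2 = [] then acc
  else
    match PySem.List.max? p.2 (fun cell => cell.1) with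
    | some m => acc ++ [m]
    | none => acc

def thin_notes_by_row_py (cells : List (Int × Int)) : List (Int × Int) :=
  if cells = [] then []
  else ((cells.foldl pvGroupStep PySem.Dict.empty).items).foldl pvPickStep []

-- ===== PORT B =====
-- the body of B's single loop: 'cur = best.get(y); if cur is None or x > cur[0]: best[y] = (x, y)'
def pvBestStep (d : PySem.Dict Int (Int × Int)) (c : Int × Int) : PySem.Dict Int (Int × Int) :=
  match d.get? c.2 with
  | none => d.insert c.2 c
  | some cur => if c.1 > cur.1 then d.insert c.2 c else d

def thin_notes_by_row_py_alt (cells : List (Int × Int)) : List (Int × Int) :=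
  (cells.foldl pvBestStep PySem.Dict.empty).values

-- ===== PRECONDITION & SPEC =====
def Spec_thin_notes_by_row_py (cells : List (Int × Int)) (out : List (Int × Int)) : Prop := out = thin_notes_by_row_py_alt cells
instance (cells : List (Int × Int)) (out : List (Int × Int)) : Decidable (Spec_thin_notes_by_row_py cells out) := by unfold Spec_thin_notes_by_row_py; infer_instance

-- ===== CLAIM (what is proved, stated in full; the proofs are below) =====
def Claim_equal_thin_notes_by_row_py : Prop := ∀ (cells : List (Int × Int)), Dom_thin_notes_by_row_py cells → Spec_thin_notes_by_row_py cells (thin_notes_by_row_py cells)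

-- ===== LEMMAS AND PROOFS =====

-- relation between one entry of A's grouping dict and one entry of B's best dict
def pvP (p : Int × List (Int × Int)) (q : Int × (Int × Int)) : Prop :=
  p.1 = q.1 ∧ PySem.List.max? p.2 (fun cell => cell.1) = some q.2

def pvInv (rows : PySem.Dict Int (List (Int × Int))) (best : PySem.Dict Int (Int × Int)) : Prop :=
  (rows.items.map (·.1)).Nodup ∧ List.Forall₂ pvP rows.items best.items

lemma pvKeysEq {xs : List (Int × List (Int × Int))} {ys : List (Int × (Int × Int))}
    (h : List.Forall₂ pvP xs ys) : xs.map (·.1) = ys.map (·.1) := by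
  induction h with
  | nil => rfl
  | cons hpq _ ih => simp [ih, hpq.1]

lemma pvMax_append (l : List (Int × Int)) (m c : Int × Int)
    (h : PySem.List.max? l (fun cell => cell.1) = some m) :
    PySem.List.max? (l ++ [c]) (fun cell => cell.1)
      = some (if m.1 < c.1 then c else m) := by
  unfold PySem.List.max? at h ⊢
  rw [List.foldl_append, h]
  simp only [List.foldl_cons, List.foldl_nil]
  split_ifs <;> rfl

lemma pvFindCorr {xs : List (Int × List (Int × Int))} {ys : List (Int × (Int × Int))}
    (h : List.Forall₂ pvP xs ys) (k : Int) {p : Int × List (Int × Int)}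
    (hf : xs.find? (fun r => r.1 == k) = some p) :
    ∃ q, ys.find? (fun r => r.1 == k) = some q ∧ pvP p q := by
  induction h with
  | nil => simp at hf
  | @cons a b xs' ys' hpq htl ih =>
    by_cases hk : a.1 = k
    · rw [List.find?_cons_of_pos (by simpa using hk)] at hf
      obtain rfl : a = p := by injection hf
      exact ⟨b, by rw [List.find?_cons_of_pos (by simp [← hpq.1, hk])], hpq⟩
    · rw [List.find?_cons_of_neg (by simpa using hk)] at hf
      obtain ⟨q, hq, hpq'⟩ := ih hf
      exact ⟨q, by rw [List.find?_cons_of_neg (by simp [← hpq.1, hk])]; exact hq, hpq'⟩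

-- map-replace is the identity when every entry with key k already equals (k, w)
lemma pvMapReplaceId {β : Type} (k : Int) (w : β) (xs : List (Int × β))
    (h : ∀ p ∈ xs, p.1 = k → p = (k, w)) :
    xs.map (fun p => if p.1 == k then (k, w) else p) = xs := by
  induction xs with
  | nil => rfl
  | cons a t ih =>
    simp only [List.map_cons]
    rw [ih (fun p hp => h p (List.mem_cons_of_mem _ hp))]
    by_cases hk : a.1 = k
    · rw [if_pos (by simpa using hk), h a (List.mem_cons_self) hk]
    · rw [if_neg (by simpa using hk)]

lemma pvMapReplaceKeys {β : Type} (k : Int) (w : β) (xs : List (Int × β)) :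
    (xs.map (fun p => if p.1 == k then (k, w) else p)).map (·.1) = xs.map (·.1) := by
  induction xs with
  | nil => rfl
  | cons a t ih =>
    simp only [List.map_cons, ih]
    by_cases hk : a.1 = k
    · rw [if_pos (by simpa using hk)]; simp [hk]
    · rw [if_neg (by simpa using hk)]

lemma pvForall₂_map (k : Int) (vA : List (Int × Int)) (vB : Int × Int)
    {xs : List (Int × List (Int × Int))} {ys : List (Int × (Int × Int))}
    (h : List.Forall₂ pvP xs ys) (hP : pvP (k, vA) (k, vB)) :
    List.Forall₂ pvP
      (xs.map (fun p => if p.1 == k then (k, vA) else p))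
      (ys.map (fun q => if q.1 == k then (k, vB) else q)) := by
  induction h with
  | nil => simp
  | @cons a b xs' ys' hpq htl ih =>
    simp only [List.map_cons]
    by_cases hk : a.1 = k
    · rw [if_pos (by simpa using hk), if_pos (by simp [← hpq.1, hk])]
      exact List.Forall₂.cons hP ih
    · rw [if_neg (by simpa using hk), if_neg (by simp [← hpq.1, hk])]
      exact List.Forall₂.cons hpq ih

lemma pvForall₂_append {α β : Type} {R : α → β → Prop} {l₁ u₁ : List α} {l₂ u₂ : List β}
    (h : List.Forall₂ R l₁ l₂) (h2 : List.Forall₂ R u₁ u₂) :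
    List.Forall₂ R (l₁ ++ u₁) (l₂ ++ u₂) := by
  induction h with
  | nil => exact h2
  | cons hab _ ih => exact List.Forall₂.cons hab ih

lemma pvInv_step (rows : PySem.Dict Int (List (Int × Int))) (best : PySem.Dict Int (Int × Int))
    (c : Int × Int) (h : pvInv rows best) : pvInv (pvGroupStep rows c) (pvBestStep best c) := by
  obtain ⟨hnd, hF⟩ := h
  by_cases hc : rows.contains c.2 = true
  · -- key already present: A appends c to the row list, B keeps the better of cur and c
    obtain ⟨p, hfp⟩ : ∃ p, rows.items.find? (fun r => r.1 == c.2) = some p := by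
      rw [← Option.isSome_iff_exists, List.find?_isSome]
      simpa [PySem.Dict.contains, List.any_eq_true] using hc
    obtain ⟨q, hfq, hpq⟩ := pvFindCorr hF c.2 hfp
    have hpk : p.1 = c.2 := by simpa using List.find?_some hfp
    have hqk : q.1 = c.2 := hpq.1 ▸ hpk
    have hgetA : rows.get? c.2 = some p.2 := by simp [PySem.Dict.get?, hfp]
    have hgetB : best.get? c.2 = some q.2 := by simp [PySem.Dict.get?, hfq]
    have hcb : best.contains c.2 = true := by
      rw [PySem.Dict.contains_eq_isSome_get?, hgetB]; rfl
    -- A's new dict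
    have hA : (pvGroupStep rows c).items
        = rows.items.map (fun r => if r.1 == c.2 then (c.2, p.2 ++ [c]) else r) := by
      simp only [pvGroupStep, hc, if_true, PySem.Dict.modify,
        PySem.Dict.getD_eq_get?_getD, hgetA, Option.getD_some]
      rw [PySem.Dict.items_insert_of_contains _ _ hc]
    -- B's new dict, uniformly as a map-replace
    set w : Int × Int := if c.1 > q.2.1 then c else q.2 with hw
    have hB : (pvBestStep best c).items
        = best.items.map (fun r => if r.1 == c.2 then (c.2, w) else r) := by
      simp only [pvBestStep, hgetB]
      by_cases hlt : c.1 > q.2.1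
      · rw [if_pos hlt, PySem.Dict.items_insert_of_contains _ _ hcb, hw, if_pos hlt]
      · rw [if_neg hlt]
        refine (pvMapReplaceId c.2 w best.items ?_).symm
        intro r hr hrk
        have hndB : (best.items.map (·.1)).Nodup := pvKeysEq hF ▸ hnd
        have hrq : r = q := List.inj_on_of_nodup_map hndB hr (List.mem_of_find?_eq_some hfq)
          (by simp [hrk, hqk])
        rw [hrq, hw, if_neg hlt, ← hqk]
    constructor
    · rw [hA, pvMapReplaceKeys]; exact hnd
    · rw [hA, hB]
      refine pvForall₂_map c.2 (p.2 ++ [c]) w hF ⟨rfl, ?_⟩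
      rw [pvMax_append p.2 q.2 c hpq.2, hw]
  · -- fresh key: both dicts append a new entry for row c.2
    have hc' : rows.contains c.2 = false := by simpa using hc
    have hnomatch : ∀ r ∈ rows.items, ¬ (r.1 == c.2) = true := by
      simpa [PySem.Dict.contains, List.any_eq_false] using hc'
    have hfA : rows.items.find? (fun r => r.1 == c.2) = none :=
      List.find?_eq_none.mpr hnomatch
    have hfB : best.items.find? (fun r => r.1 == c.2) = none := by
      rw [List.find?_eq_none]
      intro r hr
      have : r.1 ∈ best.items.map (·.1) := List.mem_map_of_mem hr
      rw [← pvKeysEq hF] at this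
      obtain ⟨s, hs, hsk⟩ := List.mem_map.mp this
      simpa [hsk] using hnomatch s hs
    have hgetB : best.get? c.2 = none := by simp [PySem.Dict.get?, hfB]
    have hcb : best.contains c.2 = false := by
      rw [PySem.Dict.contains_eq_isSome_get?, hgetB]; rfl
    have hd1 : (rows.insert c.2 ([] : List (Int × Int))).items
        = rows.items ++ [(c.2, ([] : List (Int × Int)))] :=
      PySem.Dict.items_insert_of_not_contains _ _ hc'
    have hd1get : (rows.insert c.2 ([] : List (Int × Int))).get? c.2
        = some ([] : List (Int × Int)) := by
      simp [PySem.Dict.get?, hd1, List.find?_append, hfA]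
    have hd1c : (rows.insert c.2 ([] : List (Int × Int))).contains c.2 = true := by
      rw [PySem.Dict.contains_eq_isSome_get?, hd1get]; rfl
    have hA : (pvGroupStep rows c).items = rows.items ++ [(c.2, [c])] := by
      simp only [pvGroupStep, hc', Bool.false_eq_true, if_false, PySem.Dict.modify,
        PySem.Dict.getD_eq_get?_getD, hd1get, Option.getD_some, List.nil_append]
      rw [PySem.Dict.items_insert_of_contains _ _ hd1c, hd1, List.map_append]
      rw [pvMapReplaceId c.2 [c] rows.items
        (fun r hr hrk => absurd (by simpa using hrk) (hnomatch r hr))]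
      simp
    have hB : (pvBestStep best c).items = best.items ++ [(c.2, c)] := by
      simp only [pvBestStep, hgetB]
      exact PySem.Dict.items_insert_of_not_contains _ _ hcb
    constructor
    · rw [hA, List.map_append]
      simp only [List.map_cons, List.map_nil, List.nodup_append, hnd, List.nodup_singleton,
        true_and, List.mem_singleton]
      intro a ha b hb
      obtain ⟨s, hs, hsk⟩ := List.mem_map.mp ha
      subst hb
      exact fun hac => hnomatch s hs (by simp [hsk, hac])
    · rw [hA, hB]
      exact pvForall₂_append hF (List.Forall₂.cons ⟨rfl, rfl⟩ List.Forall₂.nil)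

lemma pvOut_eq {xs : List (Int × List (Int × Int))} {ys : List (Int × (Int × Int))}
    (h : List.Forall₂ pvP xs ys) :
    ∀ acc, xs.foldl pvPickStep acc = acc ++ ys.map (·.2) := by
  induction h with
  | nil => simp
  | @cons a b xs' ys' hpq _ ih =>
    intro acc
    have hne : a.2 ≠ [] := by
      intro he
      have := hpq.2
      rw [he] at this
      simp [PySem.List.max?] at this
    simp only [List.foldl_cons, pvPickStep, if_neg hne, hpq.2, List.map_cons]
    rw [ih]
    simp

lemma pvInvLoop (cells : List (Int × Int)) :
    ∀ rows best, pvInv rows best →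
      pvInv (cells.foldl pvGroupStep rows) (cells.foldl pvBestStep best) := by
  induction cells with
  | nil => intro rows best h; exact h
  | cons c t ih => intro rows best h; exact ih _ _ (pvInv_step rows best c h)

-- ===== VERDICT (by name: the statement is the Claim_ definition above) =====
theorem thin_notes_by_row_py_spec : Claim_equal_thin_notes_by_row_py := by
  intro cells _
  unfold Spec_thin_notes_by_row_py thin_notes_by_row_py thin_notes_by_row_py_alt
  by_cases hnil : cells = []
  · subst hnil; rfl
  · rw [if_neg hnil]
    have h := pvInvLoop cells PySem.Dict.empty PySem.Dict.empty ⟨by simp [PySem.Dict.empty], List.Forall₂.nil⟩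
    rw [pvOut_eq h.2 []]
    rfl
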